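-- pv_equiv track=rewrite | github.com/shreya-jariwala/nexgen | backend/apps/retriever/main.py | order_numbers_by_occurrence
-- ===== SOURCE A (Python) =====
-- def order_numbers_by_occurrence(numbers_with_index, end_number):
--     """
--     Orders numbers from the input list based on their first occurrence,
--     following the sequence 1, 2, 3, ... and so on, ensuring that the index of a number is greater than
--     the index of the previous number.
--
--     Args:
--         numbers_with_index: A list of tuples, where each tuple contains a number and its starting index.
--
--     Returns:
--         A new list of tuples, ordered based on the first occurrence of each number, with increasing indices.
--     """
--
--     ordered_numbers = []
--     seen_numbers = set()
--     last_index = -1  # Initialize last_index to ensure the first number's index is valid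
--     for i in range(1, (end_number + 1)):
--         for number, index in numbers_with_index:
--             if number == i and number not in seen_numbers and index > last_index:
--                 ordered_numbers.append((number, index))
--                 seen_numbers.add(number)
--                 last_index = index
--                 break
--
--     return ordered_numbers
-- ===== SOURCE B (Python) =====
-- def order_numbers_by_occurrence(numbers_with_index, end_number):
--     """Group indices by number once, then walk the distinct numbers in sorted
--     order (skipping numbers outside 1..end_number), picking each group's first
--     in-order index greater than the last chosen index.  Numbers with no
--     occurrence are never visited, so the cost is independent of end_number."""
--     groups = {}
--     for number, index in numbers_with_index:
--         groups.setdefault(number, []).append(index)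
--     ordered = []
--     last = -1
--     for k in sorted(groups):
--         if 1 <= k <= end_number:
--             hit = next((idx for idx in groups[k] if idx > last), None)
--             if hit is not None:
--                 ordered.append((k, hit))
--                 last = hit
--     return ordered
-- ===== Notes on version B (the rewrite author's own statement) =====
-- stated objective: faster
-- what changed: B builds a dict of each number's indices in list order once, then iterates only the SORTED distinct numbers present (skipping those outside 1..end_number), picking the first index above the last chosen one, instead of A's rescan of the whole input list for every i in range(1, end_number+1); numbers with no occurrence are never visited.
import Mathlib
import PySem

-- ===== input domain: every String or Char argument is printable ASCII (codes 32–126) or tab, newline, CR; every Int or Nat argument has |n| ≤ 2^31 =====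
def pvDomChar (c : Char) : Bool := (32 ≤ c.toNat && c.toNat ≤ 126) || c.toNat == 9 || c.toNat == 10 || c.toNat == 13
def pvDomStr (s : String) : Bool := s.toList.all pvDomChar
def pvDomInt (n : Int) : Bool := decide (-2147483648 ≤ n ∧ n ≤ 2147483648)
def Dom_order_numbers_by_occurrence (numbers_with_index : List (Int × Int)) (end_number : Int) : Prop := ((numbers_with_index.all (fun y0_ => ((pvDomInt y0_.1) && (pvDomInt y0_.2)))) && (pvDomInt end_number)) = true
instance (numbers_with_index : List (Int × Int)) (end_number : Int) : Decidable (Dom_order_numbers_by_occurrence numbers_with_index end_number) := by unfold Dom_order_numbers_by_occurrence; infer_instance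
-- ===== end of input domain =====

-- ===== PORT A =====
-- B groups the indices by number into a dict once and walks only the sorted
-- distinct numbers present, instead of A's rescan of the whole input list for
-- every i in range(1, end_number+1) (objective: faster).

-- inner 'for (number, index) in numbers_with_index: … break' of A
def pvInnerA (i : Int) (nwi : List (Int × Int)) (acc : List (Int × Int))
    (seen : PySem.Set Int) (last : Int) : List (Int × Int) × PySem.Set Int × Int :=
  match nwi with
  | [] => (acc, seen, last)
  | (number, index) :: rest =>
    if number = i ∧ seen.contains number = false ∧ index > last then
      (acc ++ [(number, index)], seen.add number, index)
    else pvInnerA i rest acc seen last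

def order_numbers_by_occurrence (numbers_with_index : List (Int × Int)) (end_number : Int) : List (Int × Int) :=
  (((PySem.List.pyRange 1 (end_number + 1) 1).foldl
      (fun st i => pvInnerA i numbers_with_index st.1 st.2.1 st.2.2)
      (([] : List (Int × Int)), (PySem.Set.ofList ([] : List Int)), (-1 : Int)))).1

-- ===== PORT B =====
def order_numbers_by_occurrence_alt (numbers_with_index : List (Int × Int)) (end_number : Int) : List (Int × Int) :=
  -- groups.setdefault(number, []).append(index) == groups[number] = groups.get(number, []) + [index]
  let groups : PySem.Dict Int (List Int) :=
    numbers_with_index.foldl (fun d p => d.modify p.1 [] (· ++ [p.2])) PySem.Dict.empty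
  -- 'for k in sorted(groups):' iterates the keys in increasing order;
  -- 'next((idx for idx in groups[k] if idx > last), None)' is List.find?
  (((PySem.List.sorted groups.keys (fun x => x) false).foldl
      (fun st k =>
        if 1 ≤ k ∧ k ≤ end_number then
          match (groups.getD k []).find? (fun idx => decide (st.2 < idx)) with
          | some hit => (st.1 ++ [(k, hit)], hit)
          | none => st
        else st)
      (([] : List (Int × Int)), (-1 : Int)))).1

-- ===== PRECONDITION & SPEC =====
def Spec_order_numbers_by_occurrence (numbers_with_index : List (Int × Int)) (end_number : Int) (out : List (Int × Int)) : Prop := out = order_numbers_by_occurrence_alt numbers_with_index end_number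
instance (numbers_with_index : List (Int × Int)) (end_number : Int) (out : List (Int × Int)) : Decidable (Spec_order_numbers_by_occurrence numbers_with_index end_number out) := by unfold Spec_order_numbers_by_occurrence; infer_instance

-- ===== CLAIM (what is proved, stated in full; the proofs are below) =====
def Claim_equal_order_numbers_by_occurrence : Prop := ∀ (numbers_with_index : List (Int × Int)) (end_number : Int), Dom_order_numbers_by_occurrence numbers_with_index end_number → Spec_order_numbers_by_occurrence numbers_with_index end_number (order_numbers_by_occurrence numbers_with_index end_number)

-- ===== LEMMAS AND PROOFS =====

-- the common "unguarded" step both sides reduce to: scan i's in-order index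
-- group for the first index above st.2
def pvStep (nwi : List (Int × Int)) (st : List (Int × Int) × Int) (i : Int) :
    List (Int × Int) × Int :=
  match ((nwi.filter (fun p => p.1 == i)).map (·.2)).find?
      (fun idx => decide (st.2 < idx)) with
  | some hit => (st.1 ++ [(i, hit)], hit)
  | none => st

-- A's inner scan, when i is not yet in `seen`, is pvStep
theorem pvInnerA_eq_step (i : Int) (nwi : List (Int × Int)) (acc : List (Int × Int))
    (seen : PySem.Set Int) (last : Int) (h : seen.contains i = false) :
    ((pvInnerA i nwi acc seen last).1, (pvInnerA i nwi acc seen last).2.2)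
      = pvStep nwi (acc, last) i := by
  induction nwi with
  | nil => simp [pvInnerA, pvStep]
  | cons p rest ih =>
    obtain ⟨number, index⟩ := p
    by_cases hn : number = i
    · subst hn
      simp only [pvStep, List.filter_cons, beq_self_eq_true, if_pos, List.map_cons]
      have hnm : number ∉ seen := by
        intro hm
        rw [(PySem.Set.contains_iff _ _).mpr hm] at h
        cases h
      by_cases hidx : index > last
      · simp [pvInnerA, hnm, hidx, List.find?]
      · have : decide (last < index) = false := by simpa using hidx
        simp only [pvInnerA, hidx, and_false, if_neg, not_false_iff, List.find?_cons]
        simpa [pvStep] using ih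
    · have hb : (number == i) = false := by simp [hn]
      simp only [pvStep, List.filter_cons, hb]
      simp only [pvInnerA, hn, false_and, if_neg, not_false_iff]
      simpa [pvStep] using ih

-- whatever A's inner scan adds to `seen` is i or was already there
theorem pvInnerA_seen (i : Int) (nwi : List (Int × Int)) (acc : List (Int × Int))
    (seen : PySem.Set Int) (last : Int) (x : Int)
    (hx : x ∈ (pvInnerA i nwi acc seen last).2.1) : x ∈ seen ∨ x = i := by
  induction nwi generalizing acc seen last with
  | nil => exact Or.inl hx
  | cons p rest ih =>
    obtain ⟨number, index⟩ := p
    by_cases hc : number = i ∧ seen.contains number = false ∧ index > last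
    · rw [pvInnerA, if_pos hc] at hx
      rcases (PySem.Set.mem_add seen number x).1 hx with h1 | h1
      · exact Or.inl h1
      · exact Or.inr (h1.trans hc.1)
    · rw [pvInnerA, if_neg hc] at hx
      exact ih acc seen last hx

-- A's outer loop is the fold of pvStep over the range, while the seen-set stays below
theorem pv_outerA (nwi : List (Int × Int)) :
    ∀ (n : Nat) (a : Int) (acc : List (Int × Int)) (seen : PySem.Set Int) (last : Int),
    (∀ x ∈ seen, x < a) →
    ((PySem.List.pyRange a (a + (n : Int)) 1).foldl
        (fun st i => pvInnerA i nwi st.1 st.2.1 st.2.2) (acc, seen, last)).1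
      = ((PySem.List.pyRange a (a + (n : Int)) 1).foldl (pvStep nwi) (acc, last)).1 := by
  intro n
  induction n with
  | zero =>
    intro a acc seen last _
    rw [PySem.List.pyRange_one_eq_nil (by omega : a + ((0 : Nat) : Int) ≤ a)]; rfl
  | succ n ih =>
    intro a acc seen last hinv
    have hlt : a < a + ((n + 1 : Nat) : Int) := by push_cast; omega
    rw [PySem.List.pyRange_one_cons hlt]
    simp only [List.foldl_cons]
    have hca : seen.contains a = false := by
      rw [Bool.eq_false_iff]
      intro hc
      have : a ∈ seen := by simpa [PySem.Set.contains] using hc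
      exact absurd (hinv a this) (lt_irrefl a)
    have hAB := pvInnerA_eq_step a nwi acc seen last hca
    have hstep : a + ((n + 1 : Nat) : Int) = (a + 1) + (n : Int) := by push_cast; omega
    rw [hstep]
    have hinv' : ∀ x ∈ (pvInnerA a nwi acc seen last).2.1, x < a + 1 := by
      intro x hx
      rcases pvInnerA_seen a nwi acc seen last x hx with h1 | h1
      · exact lt_trans (hinv x h1) (by omega)
      · omega
    have := ih (a + 1) (pvInnerA a nwi acc seen last).1
      (pvInnerA a nwi acc seen last).2.1 (pvInnerA a nwi acc seen last).2.2 hinv'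
    rw [← hAB]
    simpa [pvStep] using this

-- folding a step that is the identity where p fails equals folding over the filter
theorem pv_foldl_filter {α β : Type} (f : β → α → β) (p : α → Bool)
    (h : ∀ st x, p x = false → f st x = st) :
    ∀ (L : List α) (init : β), L.foldl f init = (L.filter p).foldl f init := by
  intro L
  induction L with
  | nil => intro init; rfl
  | cons x rest ih =>
    intro init
    by_cases hx : p x = true
    · simp [hx, ih]
    · have hx' : p x = false := by simpa using hx
      simp [hx', h init x hx', ih]

-- a guarded fold equals the unguarded fold over the filter
theorem pv_foldl_guard {α β : Type} (f : β → α → β) (p : α → Prop) [DecidablePred p] :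
    ∀ (L : List α) (init : β),
    L.foldl (fun st x => if p x then f st x else st) init
      = (L.filter (fun x => decide (p x))).foldl f init := by
  intro L
  induction L with
  | nil => intro init; rfl
  | cons x rest ih =>
    intro init
    by_cases hx : p x
    · simp [hx, ih]
    · simp [hx, ih]

-- pvStep is the identity on numbers that do not occur in the list
theorem pvStep_id_of_not_mem (nwi : List (Int × Int)) (st : List (Int × Int) × Int)
    (i : Int) (h : i ∉ nwi.map Prod.fst) : pvStep nwi st i = st := by
  have hfil : nwi.filter (fun p => p.1 == i) = [] := by
    rw [List.filter_eq_nil_iff]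
    intro p hp hbeq
    exact h (List.mem_map.2 ⟨p, hp, by simpa using hbeq⟩)
  simp [pvStep, hfil]

-- ===== VERDICT (by name: the statement is the Claim_ definition above) =====
theorem order_numbers_by_occurrence_spec : Claim_equal_order_numbers_by_occurrence := by
  intro nwi e _
  unfold Spec_order_numbers_by_occurrence order_numbers_by_occurrence order_numbers_by_occurrence_alt
  -- B's dict lookups and keys, in terms of nwi
  simp only [PySem.Dict.getD_foldl_modify_append, PySem.Dict.getD_empty, List.nil_append]
  have hkeys : (nwi.foldl (fun d p => d.modify p.1 [] (· ++ [p.2]))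
      (PySem.Dict.empty : PySem.Dict Int (List Int))).keys
      = PySem.Set.update ([] : List Int) (nwi.map Prod.fst) := by
    rw [PySem.Dict.keys_foldl_modify_key nwi Prod.fst [] (fun _ p => (· ++ [p.2]))
      PySem.Dict.empty, PySem.Dict.keys_empty]
  rw [hkeys]
  set K : List Int := PySem.Set.update ([] : List Int) (nwi.map Prod.fst) with hK
  have hKnodup : K.Nodup := PySem.Set.nodup_update _ _ List.nodup_nil
  have hKmem : ∀ x : Int, x ∈ K ↔ x ∈ nwi.map Prod.fst := by
    intro x; rw [hK, PySem.Set.mem_update]; simp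
  -- LHS: A's fold is the fold of pvStep over the range
  have hrange : PySem.List.pyRange 1 (e + 1) 1 = PySem.List.pyRange 1 (1 + (e.toNat : Int)) 1 := by
    by_cases he : 0 ≤ e
    · congr 1; omega
    · rw [PySem.List.pyRange_one_eq_nil (by omega), PySem.List.pyRange_one_eq_nil (by omega)]
  rw [hrange,
    pv_outerA nwi e.toNat 1 [] (PySem.Set.ofList []) (-1)
      (by intro x hx; simp [PySem.Set.ofList] at hx)]
  -- RHS's step is the guarded pvStep
  have hfun : (fun (st : List (Int × Int) × Int) (k : Int) =>
      if 1 ≤ k ∧ k ≤ e then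
        match ((nwi.filter (fun p => p.1 == k)).map (·.2)).find?
            (fun idx => decide (st.2 < idx)) with
        | some hit => (st.1 ++ [(k, hit)], hit)
        | none => st
      else st)
      = (fun st k => if 1 ≤ k ∧ k ≤ e then pvStep nwi st k else st) := rfl
  rw [hfun, pv_foldl_guard (pvStep nwi) (fun k => 1 ≤ k ∧ k ≤ e)]
  -- LHS: drop the range entries whose number never occurs
  rw [pv_foldl_filter (pvStep nwi) (fun i => decide (i ∈ K))
    (by
      intro st x hx
      apply pvStep_id_of_not_mem
      intro hmem
      rw [← hKmem] at hmem
      simp [hmem] at hx)]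
  -- the two filtered index lists coincide
  have hlists : (PySem.List.pyRange 1 (1 + (e.toNat : Int)) 1).filter (fun i => decide (i ∈ K))
      = (PySem.List.sorted K (fun x => x) false).filter (fun k => decide (1 ≤ k ∧ k ≤ e)) := by
    have hsortnodup : (PySem.List.sorted K (fun x => x) false).Nodup :=
      (PySem.List.sorted_perm K (fun x => x) false).nodup_iff.mpr hKnodup
    have hsortlt : (PySem.List.sorted K (fun x => x) false).Pairwise (· < ·) := by
      have hle := PySem.List.sorted_pairwise K (fun x => x)
      exact (hle.and hsortnodup).imp (fun h => lt_of_le_of_ne h.1 h.2)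
    have h1 : ((PySem.List.pyRange 1 (1 + (e.toNat : Int)) 1).filter
        (fun i => decide (i ∈ K))).Pairwise (· < ·) :=
      (PySem.List.pairwise_lt_pyRange_one 1 (1 + (e.toNat : Int))).filter _
    have h2 : ((PySem.List.sorted K (fun x => x) false).filter
        (fun k => decide (1 ≤ k ∧ k ≤ e))).Pairwise (· < ·) := hsortlt.filter _
    have hperm : ((PySem.List.pyRange 1 (1 + (e.toNat : Int)) 1).filter
        (fun i => decide (i ∈ K))).Perm
        ((PySem.List.sorted K (fun x => x) false).filter (fun k => decide (1 ≤ k ∧ k ≤ e))) := by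
      rw [List.perm_ext_iff_of_nodup (List.Pairwise.imp (fun h => ne_of_lt h) h1)
        (List.Pairwise.imp (fun h => ne_of_lt h) h2)]
      intro x
      simp only [List.mem_filter, PySem.List.mem_pyRange_one, PySem.List.mem_sorted,
        decide_eq_true_eq]
      constructor
      · rintro ⟨⟨hx1, hx2⟩, hx3⟩
        exact ⟨hx3, hx1, by omega⟩
      · rintro ⟨hx1, hx2, hx3⟩
        exact ⟨⟨hx2, by omega⟩, hx1⟩
    exact hperm.eq_of_pairwise (fun a b _ _ hab hba => absurd hab (asymm hba)) h1 h2
  rw [hlists]
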